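-- pv_equiv track=rewrite | github.com/chasefrankenfeld/how_to_think_like_a_computer_scientist | chapters14_to_16/ch14_eight_queens_puzzle.py | rotate_90_degrees
-- ===== SOURCE A (Python) =====
-- def rotate_90_degrees(bd):
--     """ Rotate the board anti-clockwise.
--         The value becomes the index.
--         The index becomes the value = (len(bd) - 1) - index)
--     """
--     a = []
--     n = []
--     for (i, j) in enumerate(bd):
--         a.append([j, (len(bd) - 1) - i])
--     a.sort()
--     for x, y in a:
--         n.append(y)
--     return n
-- ===== SOURCE B (Python) =====
-- def rotate_90_degrees(bd):
--     """ Rotate the board anti-clockwise.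
--         Group the rotated indices into per-value buckets with one dict pass,
--         then emit the buckets in ascending key order; only the distinct values
--         are sorted, and each bucket is reversed (indices were collected in
--         descending rotated-index order).
--     """
--     n = len(bd)
--     buckets = {}
--     for i, j in enumerate(bd):
--         buckets.setdefault(j, []).append(n - 1 - i)
--     out = []
--     for j in sorted(buckets):
--         out.extend(reversed(buckets[j]))
--     return out
-- ===== Notes on version B (the rewrite author's own statement) =====
-- stated objective: alternative
-- what changed: Instead of building the full [value, rotated-index] pair list and lexicographically sorting all n pairs, B groups the rotated indices into per-value buckets with one dict pass, sorts only the distinct values, and emits each bucket reversed; ties are handled by the bucket order instead of a composite sort key.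
import Mathlib
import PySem

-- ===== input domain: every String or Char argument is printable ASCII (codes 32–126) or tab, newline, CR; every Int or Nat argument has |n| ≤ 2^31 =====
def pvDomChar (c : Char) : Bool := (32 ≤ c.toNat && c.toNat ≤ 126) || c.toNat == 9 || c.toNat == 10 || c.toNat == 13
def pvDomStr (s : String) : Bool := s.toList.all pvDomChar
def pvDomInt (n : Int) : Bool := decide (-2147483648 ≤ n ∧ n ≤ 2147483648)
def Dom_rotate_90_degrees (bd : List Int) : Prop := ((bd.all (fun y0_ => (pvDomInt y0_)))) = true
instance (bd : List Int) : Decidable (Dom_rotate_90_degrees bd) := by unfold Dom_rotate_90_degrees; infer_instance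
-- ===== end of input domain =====

-- B replaces A's build-pairs / lexicographic-sort / extract pipeline by dict bucketing:
-- one pass groups the rotated indices per value, only the DISTINCT values are sorted,
-- and the buckets are emitted in ascending key order (reversed, restoring A's tie order).


-- ===== PORT A =====
-- Python lists [j, y] of two ints are modelled as pairs; their lexicographic list
-- comparison in a.sort() is the tuple sort PySem.List.sorted2 (·.1) (·.2).
def rotate_90_degrees (bd : List Int) : List Int :=
  let a := (PySem.List.enumerate bd).foldl
    (fun acc p => acc ++ [(p.2, ((bd.length : Int) - 1) - p.1)]) ([] : List (Int × Int))
  let a' := PySem.List.sorted2 a (fun p => p.1) (fun p => p.2)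
  a'.foldl (fun acc p => acc ++ [p.2]) ([] : List Int)

-- ===== PORT B =====
-- buckets.setdefault(j, []).append(y) is Dict.modify j [] (· ++ [y]);
-- sorted(buckets) sorts the keys.
def rotate_90_degrees_alt (bd : List Int) : List Int :=
  let n : Int := bd.length
  let buckets := (PySem.List.enumerate bd).foldl
    (fun d p => d.modify p.2 [] (fun v => v ++ [n - 1 - p.1]))
    (PySem.Dict.empty : PySem.Dict Int (List Int))
  (PySem.List.sorted buckets.keys (fun k => k)).foldl
    (fun acc j => acc ++ (buckets.getD j []).reverse) ([] : List Int)

-- ===== PRECONDITION & SPEC =====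
def Spec_rotate_90_degrees (bd : List Int) (out : List Int) : Prop := out = rotate_90_degrees_alt bd
instance (bd : List Int) (out : List Int) : Decidable (Spec_rotate_90_degrees bd out) := by unfold Spec_rotate_90_degrees; infer_instance

-- ===== CLAIM (what is proved, stated in full; the proofs are below) =====
def Claim_equal_rotate_90_degrees : Prop := ∀ (bd : List Int), Dom_rotate_90_degrees bd → Spec_rotate_90_degrees bd (rotate_90_degrees bd)

-- ===== LEMMAS AND PROOFS =====

-- A's pair list: (value, rotated index) for each board square.
def pvPairs (bd : List Int) : List (Int × Int) :=
  (PySem.List.enumerate bd).map (fun p => (p.2, ((bd.length : Int) - 1) - p.1))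

-- B's bucket dictionary, as the port builds it.
def pvBuckets (bd : List Int) : PySem.Dict Int (List Int) :=
  (PySem.List.enumerate bd).foldl
    (fun d p => d.modify p.2 [] (fun v => v ++ [((bd.length : Int) - 1) - p.1]))
    PySem.Dict.empty

-- A tuple-key sort is the scalar sort under the lexicographic order on pairs.
theorem pvSorted2_eq_sorted_toLex (xs : List (Int × Int)) :
    PySem.List.sorted2 xs (fun p => p.1) (fun p => p.2)
      = PySem.List.sorted xs (fun p => toLex (p.1, p.2)) := by
  have hb : (fun (a b : Int × Int) => decide (a.1 < b.1) || (!decide (b.1 < a.1) && decide (a.2 < b.2)))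
      = (fun (a b : Int × Int) => decide (toLex (a.1, a.2) < toLex (b.1, b.2))) := by
    funext a b
    by_cases h1 : a.1 < b.1 <;> by_cases h2 : b.1 < a.1 <;> by_cases h3 : a.2 < b.2 <;>
      simp [h1, h2, h3, Prod.Lex.lt_iff] <;> omega
  change List.foldl (fun acc x => PySem.List.insertBy
      (fun a b => decide (a.1 < b.1) || (!decide (b.1 < a.1) && decide (a.2 < b.2))) x acc) [] xs
    = List.foldl (fun acc x => PySem.List.insertBy
      (fun a b => decide (toLex (a.1, a.2) < toLex (b.1, b.2))) x acc) [] xs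
  rw [hb]

-- The bucket of key j holds the second components of A's j-keyed pairs, in pair order.
theorem pvBuckets_getD (bd : List Int) (j : Int) :
    (pvBuckets bd).getD j [] = ((pvPairs bd).filter (fun p => p.1 == j)).map (fun p => p.2) := by
  have h : pvBuckets bd
      = (pvPairs bd).foldl (fun d p => d.modify p.1 [] (fun v => v ++ [p.2])) PySem.Dict.empty := by
    unfold pvBuckets pvPairs
    rw [List.foldl_map]
  rw [h, PySem.Dict.getD_foldl_modify_append, PySem.Dict.getD_empty, List.nil_append]

-- The keys of the bucket dictionary are the distinct board values, first occurrence first.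
theorem pvBuckets_keys (bd : List Int) :
    (pvBuckets bd).keys = PySem.Set.ofList bd := by
  unfold pvBuckets
  rw [PySem.Dict.keys_foldl_modify_key (PySem.List.enumerate bd) (fun p => p.2) []
    (fun _ p => fun v => v ++ [((bd.length : Int) - 1) - p.1]) PySem.Dict.empty]
  rw [PySem.Dict.keys_empty, PySem.List.map_snd_enumerate]
  rfl

-- Concatenating the (reversed) key-filtered sublists over a duplicate-free list of all
-- occurring keys is a permutation of the original list.
theorem pvFlatMap_filter_perm (ks : List Int) (xs : List (Int × Int))
    (hnd : ks.Nodup) (hmem : ∀ p ∈ xs, p.1 ∈ ks) :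
    (ks.flatMap (fun k => ((xs.filter (fun p => p.1 == k)).reverse))).Perm xs := by
  induction ks generalizing xs with
  | nil =>
    cases xs with
    | nil => simp
    | cons p t => exact absurd (hmem p List.mem_cons_self) (List.not_mem_nil)
  | cons k ks' ih =>
    rw [List.flatMap_cons]
    rw [List.nodup_cons] at hnd
    have hcongr : ks'.flatMap (fun k' => ((xs.filter (fun p => p.1 == k')).reverse))
        = ks'.flatMap (fun k' => (((xs.filter (fun p => !(p.1 == k))).filter (fun p => p.1 == k')).reverse)) := by
      apply List.flatMap_congr
      intro k' hk'
      have hne : k' ≠ k := fun hc => hnd.1 (hc ▸ hk')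
      rw [List.filter_filter]
      congr 1
      apply List.filter_congr
      intro p _
      by_cases h : p.1 = k'
      · simp [h, hne]
      · simp [h]
    rw [hcongr]
    have h2 : (ks'.flatMap (fun k' => (((xs.filter (fun p => !(p.1 == k))).filter (fun p => p.1 == k')).reverse))).Perm
        (xs.filter (fun p => !(p.1 == k))) := by
      apply ih _ hnd.2
      intro p hp
      rcases List.mem_filter.mp hp with ⟨hpx, hne⟩
      rcases List.mem_cons.mp (hmem p hpx) with h | h
      · simp [h] at hne
      · exact h
    exact ((List.reverse_perm _).append h2).trans (List.filter_append_perm _ xs)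

-- The flatMap over strictly increasing keys is pairwise strictly lex-increasing.
theorem pvFlatMap_pairwise (ks : List Int) (xs : List (Int × Int))
    (hks : ks.Pairwise (· < ·))
    (hxs : xs.Pairwise (fun p q => q.2 < p.2)) :
    (ks.flatMap (fun k => ((xs.filter (fun p => p.1 == k)).reverse))).Pairwise
      (fun p q => toLex (p.1, p.2) < toLex (q.1, q.2)) := by
  rw [List.pairwise_flatMap]
  constructor
  · intro k _
    have h1 : (xs.filter (fun p => p.1 == k)).Pairwise (fun p q => q.2 < p.2) :=
      hxs.filter _
    have h2 : ((xs.filter (fun p => p.1 == k)).reverse).Pairwise (fun p q => p.2 < q.2) :=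
      List.pairwise_reverse.mpr h1
    refine h2.imp_of_mem ?_
    intro p q hp hq hlt
    have hpk : p.1 = k := by
      have := (List.mem_filter.mp (List.mem_reverse.mp hp)).2; simpa using this
    have hqk : q.1 = k := by
      have := (List.mem_filter.mp (List.mem_reverse.mp hq)).2; simpa using this
    rw [Prod.Lex.lt_iff]
    simp only [ofLex_toLex]
    omega
  · refine hks.imp_of_mem ?_
    intro k1 k2 _ _ hlt p hp q hq
    have hpk : p.1 = k1 := by
      have := (List.mem_filter.mp (List.mem_reverse.mp hp)).2; simpa using this
    have hqk : q.1 = k2 := by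
      have := (List.mem_filter.mp (List.mem_reverse.mp hq)).2; simpa using this
    rw [Prod.Lex.lt_iff]
    simp only [ofLex_toLex]
    omega

-- A's pair list has strictly decreasing second components (indices increase).
theorem pvPairs_pairwise (bd : List Int) :
    (pvPairs bd).Pairwise (fun p q => q.2 < p.2) := by
  unfold pvPairs
  rw [List.pairwise_map]
  refine (PySem.List.pairwise_lt_enumerate bd 0).imp ?_
  intro p q h
  simp only
  omega

-- The sorted key list is strictly increasing.
theorem pvSortedKeys_pairwise (bd : List Int) :
    (PySem.List.sorted (PySem.Set.ofList bd) (fun k => k)).Pairwise (· < ·) := by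
  have hle := PySem.List.sorted_pairwise (PySem.Set.ofList bd) (fun k => k)
  have hnd : (PySem.List.sorted (PySem.Set.ofList bd) (fun k => k)).Nodup :=
    ((PySem.List.sorted_perm (PySem.Set.ofList bd) (fun k => k) false).nodup_iff).mpr
      (PySem.Set.nodup_ofList bd)
  refine (hle.and hnd).imp ?_
  intro a b h
  exact lt_of_le_of_ne h.1 h.2

-- A's sorted pair list equals the concatenation of B's buckets in key order.
theorem pvSorted_eq_flatMap (bd : List Int) :
    PySem.List.sorted2 (pvPairs bd) (fun p => p.1) (fun p => p.2)
      = (PySem.List.sorted (PySem.Set.ofList bd) (fun k => k)).flatMap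
          (fun k => (((pvPairs bd).filter (fun p => p.1 == k)).reverse)) := by
  rw [pvSorted2_eq_sorted_toLex]
  apply PySem.List.sorted_eq_of_perm_of_pairwise_lt
  · apply pvFlatMap_filter_perm
    · exact ((PySem.List.sorted_perm (PySem.Set.ofList bd) (fun k => k) false).nodup_iff).mpr
        (PySem.Set.nodup_ofList bd)
    · intro p hp
      have hval : p.1 ∈ bd := by
        unfold pvPairs at hp
        rcases List.mem_map.mp hp with ⟨q, hq, rfl⟩
        rcases (PySem.List.mem_enumerate_iff bd 0 q).mp hq with ⟨k, hk, rfl⟩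
        exact List.getElem_mem hk
      exact ((PySem.List.sorted_perm (PySem.Set.ofList bd) (fun k => k) false).mem_iff).mpr
        ((PySem.Set.mem_ofList bd p.1).mpr hval)
  · exact pvFlatMap_pairwise _ _ (pvSortedKeys_pairwise bd) (pvPairs_pairwise bd)

-- ===== VERDICT (by name: the statement is the Claim_ definition above) =====
theorem rotate_90_degrees_spec : Claim_equal_rotate_90_degrees := by
  intro bd _
  unfold Spec_rotate_90_degrees rotate_90_degrees rotate_90_degrees_alt
  simp only [PySem.List.foldl_append_singleton_eq_map, PySem.List.foldl_append_eq_flatMap,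
    List.nil_append]
  have hpairs : (PySem.List.enumerate bd).map (fun p => (p.2, ((bd.length : Int) - 1) - p.1))
      = pvPairs bd := rfl
  have hbk : (PySem.List.enumerate bd).foldl
      (fun d p => d.modify p.2 [] (fun v => v ++ [((bd.length : Int) - 1) - p.1]))
      (PySem.Dict.empty : PySem.Dict Int (List Int)) = pvBuckets bd := rfl
  rw [hpairs, hbk, pvBuckets_keys, pvSorted_eq_flatMap, List.map_flatMap]
  apply List.flatMap_congr
  intro k _
  rw [pvBuckets_getD, List.map_reverse]
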